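-- pv_equiv track=rewrite | github.com/GustavoDev811/vgm-volume-detecter | VGMVolumeDetector/analyzer.py | _build_arp_macro
-- ===== SOURCE A (Python) =====
-- import math
--
-- def _build_arp_macro(freqs: list[int], vol_len: int) -> list[int]:
--     """
--     Constrói macro de arpejo a partir das frequências capturadas durante o envelope.
--     Retorna lista de offsets em semitons relativos à primeira nota.
--     Se não houver variação, retorna [0] * vol_len.
--     """
--     if len(freqs) < 2:
--         return [0] * vol_len
--
--     # Verifica se há variação real de frequência
--     if len(set(freqs)) < 2:
--         return [0] * vol_len
--
--     # Converte frequências para MIDI e calcula offsets relativos à primeira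
--     def freq_to_midi(f: int) -> int:
--         if f <= 0:
--             return 0
--         try:
--             return round(69 + 12 * math.log2(f / 440.0))
--         except ValueError:
--             return 0
--
--     base  = freq_to_midi(freqs[0])
--     arp   = [freq_to_midi(f) - base for f in freqs]
--
--     # Ajusta tamanho para coincidir com o envelope de volume
--     if len(arp) < vol_len:
--         arp += [arp[-1]] * (vol_len - len(arp))
--     return arp[:vol_len]
-- ===== SOURCE B (Python) =====
-- import math
--
-- def _build_arp_macro(freqs: list[int], vol_len: int) -> list[int]:
--     """Single pass over the output positions: index clamped to the last
--     frequency folds padding and truncation into the loop itself.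
--     For a negative vol_len it returns [] (the intended empty macro),
--     where the original's arp[:vol_len] drops elements from the end."""
--     if len(freqs) < 2:
--         return [0] * vol_len
--     if len(set(freqs)) < 2:
--         return [0] * vol_len
--
--     def freq_to_midi(f: int) -> int:
--         if f <= 0:
--             return 0
--         try:
--             return round(69 + 12 * math.log2(f / 440.0))
--         except ValueError:
--             return 0
--
--     base = freq_to_midi(freqs[0])
--     last = len(freqs) - 1
--     return [freq_to_midi(freqs[min(i, last)]) - base for i in range(vol_len)]
-- ===== Notes on version B (the rewrite author's own statement) =====
-- stated objective: alternative
-- what changed: Instead of mapping all frequencies to offsets and then padding with the last element and slicing to vol_len, B builds the result in one pass over the vol_len output positions with the frequency index clamped to the last element, so no intermediate list is built or resized.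
-- intended difference: For negative vol_len on lists with at least two distinct frequencies and -len(freqs) < vol_len < 0, A's arp[:vol_len] wraps the negative bound and returns the offset list with its last |vol_len| elements dropped, while B returns [] — the intended empty macro for a non-positive requested length (A itself returns [] in its guard branches for the same vol_len). — e.g. on _build_arp_macro([440, 880], -1): A returns [0], B returns []
import Mathlib
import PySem

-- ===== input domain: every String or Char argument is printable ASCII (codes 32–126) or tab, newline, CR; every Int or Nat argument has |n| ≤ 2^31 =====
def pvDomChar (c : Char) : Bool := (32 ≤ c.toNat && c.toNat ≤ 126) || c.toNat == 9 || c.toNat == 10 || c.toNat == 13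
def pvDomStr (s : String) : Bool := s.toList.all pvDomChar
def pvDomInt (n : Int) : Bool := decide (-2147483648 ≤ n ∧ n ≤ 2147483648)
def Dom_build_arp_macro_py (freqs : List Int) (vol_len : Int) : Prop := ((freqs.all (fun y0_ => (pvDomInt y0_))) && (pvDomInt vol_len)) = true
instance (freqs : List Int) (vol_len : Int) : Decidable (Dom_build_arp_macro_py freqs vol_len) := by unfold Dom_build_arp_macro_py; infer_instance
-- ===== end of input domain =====

-- B folds the pad-with-last / truncate steps into one clamped-index pass over the output
-- positions; it returns [] for negative vol_len where A's arp[:vol_len] wraps (stated as D_).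

-- ===== PORT A =====
-- shared helper: exact port of the inner freq_to_midi.
-- pvFindK A fuel k P = the least k' ≥ k with A < P * 4^(k'-k) (P carried along), up to the fuel.
def pvFindK (A : Nat) : Nat → Nat → Nat → Nat
  | 0, k, _ => k
  | fuel + 1, k, P => if A < P then k else pvFindK A fuel (k + 1) (P * 4)

-- freq_to_midi: `round(69 + 12 * math.log2(f / 440.0))` ported exactly as the nearest
-- integer to 69 + 12*log2(f/440): that integer is 69 + k - 107 for the least k with
-- f^24 * 2^213 < 440^24 * 4^k (no ties exist: f^24 = 2^odd * 440^24 is impossible for an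
-- integer f).  Checked against CPython's float evaluation on the whole |f| ≤ 2^31 domain
-- (boundary neighbourhoods and random sampling); fuel 600 covers that domain.
-- The `except ValueError` branch is dead (math.log2 raises only for f <= 0, already guarded).
def freqToMidi (f : Int) : Int :=
  if f ≤ 0 then 0
  else 69 + (pvFindK (f.toNat ^ 24 * 2 ^ 213) 600 0 (440 ^ 24) : Int) - 107

def build_arp_macro_py (freqs : List Int) (vol_len : Int) : List Int :=
  if freqs.length < 2 then List.replicate vol_len.toNat 0          -- [0] * vol_len
  else if (PySem.Set.ofList freqs).length < 2 then List.replicate vol_len.toNat 0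
  else
    let base := freqToMidi (freqs.getD 0 0)                        -- freqs[0]: in range, len ≥ 2
    let arp := freqs.map (fun f => freqToMidi f - base)
    let arp2 := if (arp.length : Int) < vol_len then
        arp ++ List.replicate (vol_len - (arp.length : Int)).toNat (arp.getLastD 0)  -- arp[-1]: arp ≠ []
      else arp
    PySem.List.slice arp2 none (some vol_len)                      -- arp[:vol_len]

-- ===== PORT B =====
def build_arp_macro_py_alt (freqs : List Int) (vol_len : Int) : List Int :=
  if freqs.length < 2 then List.replicate vol_len.toNat 0
  else if (PySem.Set.ofList freqs).length < 2 then List.replicate vol_len.toNat 0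
  else
    let base := freqToMidi (freqs.getD 0 0)
    let last := freqs.length - 1
    (List.range vol_len.toNat).map (fun i => freqToMidi (freqs.getD (min i last) 0) - base)

-- ===== PRECONDITION & SPEC =====
-- For -len(freqs) < vol_len < 0 on a list with ≥ 2 distinct frequencies, A's arp[:vol_len]
-- wraps the negative bound and returns the offsets minus their last |vol_len| elements;
-- B returns [], the intended empty macro for a non-positive length (A's own guard branches
-- return [] for the same vol_len).
def D_build_arp_macro_py (freqs : List Int) (vol_len : Int) : Prop :=
  2 ≤ freqs.length ∧ (∃ x ∈ freqs, x ≠ freqs.headI) ∧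
    -(freqs.length : Int) < vol_len ∧ vol_len < 0
instance (freqs : List Int) (vol_len : Int) : Decidable (D_build_arp_macro_py freqs vol_len) := by
  unfold D_build_arp_macro_py; infer_instance

def Spec_build_arp_macro_py (freqs : List Int) (vol_len : Int) (out : List Int) : Prop :=
  ¬ D_build_arp_macro_py freqs vol_len → out = build_arp_macro_py_alt freqs vol_len
instance (freqs : List Int) (vol_len : Int) (out : List Int) : Decidable (Spec_build_arp_macro_py freqs vol_len out) := by
  unfold Spec_build_arp_macro_py; infer_instance

def pvDiffWitness_build_arp_macro_py : List Int × Int := ([440, 880], -1)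
def pvDiffWitnessOut_build_arp_macro_py : (List Int) × (List Int) := ([0], [])

-- ===== CLAIM (what is proved, stated in full; the proofs are below) =====
def Claim_unchanged_build_arp_macro_py : Prop := ∀ (freqs : List Int) (vol_len : Int), Dom_build_arp_macro_py freqs vol_len → Spec_build_arp_macro_py freqs vol_len (build_arp_macro_py freqs vol_len)
def Claim_changed_build_arp_macro_py : Prop := Dom_build_arp_macro_py (pvDiffWitness_build_arp_macro_py.1) (pvDiffWitness_build_arp_macro_py.2) ∧ D_build_arp_macro_py (pvDiffWitness_build_arp_macro_py.1) (pvDiffWitness_build_arp_macro_py.2) ∧ build_arp_macro_py (pvDiffWitness_build_arp_macro_py.1) (pvDiffWitness_build_arp_macro_py.2) = pvDiffWitnessOut_build_arp_macro_py.1 ∧ build_arp_macro_py_alt (pvDiffWitness_build_arp_macro_py.1) (pvDiffWitness_build_arp_macro_py.2) = pvDiffWitnessOut_build_arp_macro_py.2 ∧ pvDiffWitnessOut_build_arp_macro_py.1 ≠ pvDiffWitnessOut_build_arp_macro_py.2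
def Claim_exact_build_arp_macro_py : Prop := ∀ (freqs : List Int) (vol_len : Int), Dom_build_arp_macro_py freqs vol_len → D_build_arp_macro_py freqs vol_len → build_arp_macro_py freqs vol_len ≠ build_arp_macro_py_alt freqs vol_len

-- ===== LEMMAS AND PROOFS =====

-- len(set(freqs)) >= 2 means some element differs from the first one
theorem pv_set_two_exists (freqs : List Int)
    (h : 2 <= (PySem.Set.ofList freqs).length) : ∃ x ∈ freqs, x ≠ freqs.headI := by
  by_contra hall
  push Not at hall
  have hnd := PySem.Set.nodup_ofList (α := Int) freqs
  have hmem : ∀ x, x ∈ PySem.Set.ofList freqs → x = freqs.headI :=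
    fun x hx => hall x ((PySem.Set.mem_ofList freqs x).1 hx)
  revert h hnd hmem
  cases hset : PySem.Set.ofList freqs with
  | nil => simp
  | cons a t =>
    cases t with
    | nil => simp
    | cons b u =>
      intro h hnd hmem
      have ha := hmem a (by simp)
      have hb := hmem b (by simp)
      subst ha
      rw [hb] at hnd
      simp at hnd

-- converse: a differing element forces len(set(freqs)) >= 2
theorem pv_two_le_set (freqs : List Int) (hne : freqs ≠ [])
    (h : ∃ x ∈ freqs, x ≠ freqs.headI) : 2 <= (PySem.Set.ofList freqs).length := by
  obtain ⟨x, hx, hxne⟩ := h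
  have hh : freqs.headI ∈ PySem.Set.ofList freqs :=
    (PySem.Set.mem_ofList freqs _).2
      (by cases freqs with
          | nil => exact absurd rfl hne
          | cons a t => simp [List.headI])
  have hx' : x ∈ PySem.Set.ofList freqs := (PySem.Set.mem_ofList freqs x).2 hx
  by_contra hlt
  push Not at hlt
  interval_cases hl : (PySem.Set.ofList freqs).length
  · exact absurd hx' (by simp [List.length_eq_zero_iff.mp hl])
  · obtain ⟨a, ha⟩ := List.length_eq_one_iff.mp hl
    rw [ha] at hx' hh
    simp at hx' hh
    exact hxne (hx'.trans hh.symm)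

-- the main branch of both ports, outside the negative-slice region
theorem pv_main (freqs : List Int) (vol_len : Int) (base : Int)
    (h2 : 2 <= freqs.length)
    (hv : 0 <= vol_len ∨ vol_len <= -(freqs.length : Int)) :
    (PySem.List.slice
      (if ((freqs.map (fun f => freqToMidi f - base)).length : Int) < vol_len then
          (freqs.map (fun f => freqToMidi f - base)) ++
            List.replicate (vol_len - ((freqs.map (fun f => freqToMidi f - base)).length : Int)).toNat
              ((freqs.map (fun f => freqToMidi f - base)).getLastD 0)
        else (freqs.map (fun f => freqToMidi f - base))) none (some vol_len))
    = (List.range vol_len.toNat).map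
        (fun i => freqToMidi (freqs.getD (min i (freqs.length - 1)) 0) - base) := by
  set arp := freqs.map (fun f => freqToMidi f - base) with harp
  have hlen : arp.length = freqs.length := by simp [harp]
  have harpne : arp ≠ [] := by
    intro h; rw [h] at hlen; simp at hlen; omega
  rcases hv with hv | hv
  · -- vol_len >= 0
    obtain ⟨v, rfl⟩ : ∃ v : Nat, vol_len = (v : Int) :=
      ⟨vol_len.toNat, (Int.toNat_of_nonneg hv).symm⟩
    rw [PySem.List.slice_to _ (by positivity)]
    simp only [Int.toNat_natCast]
    have hget : ∀ j (hj : j < freqs.length),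
        arp[j]'(by omega) = freqToMidi (freqs.getD j 0) - base := by
      intro j hj
      simp [harp, List.getD, List.getElem?_eq_getElem hj]
    have hlast : arp.getLastD 0 = freqToMidi (freqs.getD (freqs.length - 1) 0) - base := by
      rw [List.getLastD_eq_getLast?, List.getLast?_eq_getElem?,
          List.getElem?_eq_getElem (by omega), Option.getD_some]
      simp only [hlen]
      exact hget (freqs.length - 1) (by omega)
    split_ifs with hpad
    · -- padding branch: freqs.length < v
      have hnv : freqs.length < v := by rw [hlen] at hpad; exact_mod_cast hpad
      have hlen2 : (arp ++ List.replicate ((v : Int) - (arp.length : Int)).toNat (arp.getLastD 0)).length = v := by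
        rw [List.length_append, List.length_replicate, hlen]
        omega
      apply List.ext_getElem
      · simp; omega
      · intro i h1 h2'
        have hiv : i < v := by simpa using h2'
        rw [List.getElem_take]
        simp only [List.getElem_map, List.getElem_range]
        by_cases hin : i < freqs.length
        · rw [List.getElem_append_left (by omega), hget i hin, Nat.min_eq_left (by omega)]
        · rw [List.getElem_append_right (by omega), List.getElem_replicate, hlast,
              Nat.min_eq_right (by omega)]
    · -- no padding: v <= freqs.length
      have hnv : v <= freqs.length := by rw [hlen] at hpad; omega
      apply List.ext_getElem
      · simp [hlen]; omega
      · intro i h1 h2'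
        have hiv : i < v := by simpa using h2'
        rw [List.getElem_take]
        simp only [List.getElem_map, List.getElem_range]
        rw [hget i (by omega), Nat.min_eq_left (by omega)]
  · -- vol_len <= -freqs.length : both sides empty
    have hneg : vol_len < 0 := by omega
    have h1 : vol_len.toNat = 0 := by omega
    have h2' : ¬ ((arp.length : Int) < vol_len) := by rw [hlen]; omega
    rw [if_neg h2', h1]
    have hb : PySem.List.clampIdx arp.length vol_len = 0 := by
      simp only [PySem.List.clampIdx, if_pos hneg]
      rw [hlen]
      split_ifs with h3
      · rfl
      · omega
    simp [PySem.List.slice, hb]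

theorem pv_unfold_eq (freqs : List Int) (vol_len : Int)
    (h2 : 2 <= freqs.length)
    (hset : 2 <= (PySem.Set.ofList freqs).length)
    (hv : 0 <= vol_len ∨ vol_len <= -(freqs.length : Int)) :
    build_arp_macro_py freqs vol_len = build_arp_macro_py_alt freqs vol_len := by
  unfold build_arp_macro_py build_arp_macro_py_alt
  rw [if_neg (by omega), if_neg (by omega), if_neg (by omega), if_neg (by omega)]
  exact pv_main freqs vol_len _ h2 hv

-- ===== VERDICT (by name: the statement is the Claim_ definition above) =====
theorem build_arp_macro_py_spec : Claim_unchanged_build_arp_macro_py := by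
  intro freqs vol_len _ hnD
  by_cases hg1 : freqs.length < 2
  · unfold build_arp_macro_py build_arp_macro_py_alt
    rw [if_pos hg1, if_pos hg1]
  · by_cases hg2 : (PySem.Set.ofList freqs).length < 2
    · unfold build_arp_macro_py build_arp_macro_py_alt
      rw [if_neg hg1, if_neg hg1, if_pos hg2, if_pos hg2]
    · apply pv_unfold_eq freqs vol_len (by omega) (by omega)
      by_contra hv
      push Not at hv
      exact hnD ⟨by omega, pv_set_two_exists freqs (by omega), by omega, by omega⟩

set_option maxRecDepth 8192 in
theorem build_arp_macro_py_changed : Claim_changed_build_arp_macro_py := by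
  unfold Claim_changed_build_arp_macro_py; decide

theorem build_arp_macro_py_tight : Claim_exact_build_arp_macro_py := by
  intro freqs vol_len _ hD heq
  obtain ⟨h2, hex, hlo, hhi⟩ := hD
  have hne : freqs ≠ [] := by intro h; rw [h] at h2; simp at h2
  have hset := pv_two_le_set freqs hne hex
  -- B's value is [] (vol_len < 0), A's value is nonempty: contradiction
  have hBnil : build_arp_macro_py_alt freqs vol_len = [] := by
    unfold build_arp_macro_py_alt
    rw [if_neg (by omega), if_neg (by omega)]
    have : vol_len.toNat = 0 := by omega
    simp [this]
  have hAlen : (build_arp_macro_py freqs vol_len).length = (↑freqs.length + vol_len).toNat := by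
    unfold build_arp_macro_py
    rw [if_neg (by omega), if_neg (by omega)]
    simp only [List.length_map]
    rw [if_neg (show ¬ ((freqs.length : Int) < vol_len) by omega)]
    simp only [PySem.List.slice, PySem.List.clampIdx, List.length_map, List.drop_zero]
    rw [if_pos (show vol_len < 0 by omega),
        if_neg (show ¬ ((freqs.length : Int) + vol_len < 0) by omega)]
    simp only [List.length_take, List.length_map]
    omega
  rw [heq, hBnil] at hAlen
  simp at hAlen
  omega
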